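-- pv_equiv track=rewrite | github.com/Canadian-Light-Source/pyStxm | bcm/devices/ophyd/ad_utils.py | gen_list_of_row_change_img_indexs
-- ===== SOURCE A (Python) =====
-- def gen_list_of_row_change_img_indexs(npoints_per_row, num_rows, first_img_idx=0, num_extra_trigs_per_row=1,subdir="/00_00",fprefix="FPREFIX",fsuffix="h5"):
--     """
--     C230728003_000030.h5
--     generate a list of image index numbers that represent the images that would have been
--     acquired when the scan was changing to next row, those images will be removed at teh end of the
--     scan because they are essentially garbage
--     Typically
--     num_extra_trigs_per_row = 1
--
--     """
--     rmv_img_idx_lst = []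
--     idx = first_img_idx
--     while idx < first_img_idx + (npoints_per_row * num_rows):
--         #make npoints_per_row zero based
--         if idx == first_img_idx:
--             idx += npoints_per_row
--             rmv_img_idx_lst.append(idx)
--         else:
--             idx += npoints_per_row + num_extra_trigs_per_row
--             rmv_img_idx_lst.append(idx)
--     idx += 1
--     #add the extra files produced by the extra row from E712 for triggering SIS3820
--     rmv_img_idx_lst.extend(list(range(idx, idx + npoints_per_row + num_extra_trigs_per_row + num_extra_trigs_per_row)))
--     fnames_lst = []
--     for r_idx in rmv_img_idx_lst:
--         fs = f"{subdir}/{fprefix}_{r_idx:06d}.{fsuffix}"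
--         fnames_lst.append(fs)
--
--     return rmv_img_idx_lst, fnames_lst
-- ===== SOURCE B (Python) =====
-- def gen_list_of_row_change_img_indexs(npoints_per_row, num_rows, first_img_idx=0, num_extra_trigs_per_row=1, subdir="/00_00", fprefix="FPREFIX", fsuffix="h5"):
--     total = npoints_per_row * num_rows
--     step = npoints_per_row + num_extra_trigs_per_row
--     if total > 0:
--         start = first_img_idx + npoints_per_row
--         rem = total - npoints_per_row
--         k = 0 if rem <= 0 else -((-rem) // step)  # ceil(rem / step)
--         prog = [start + j * step for j in range(k + 1)]
--         idx = start + k * step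
--     else:
--         prog = []
--         idx = first_img_idx
--     tail_start = idx + 1
--     tail = list(range(tail_start, tail_start + npoints_per_row + 2 * num_extra_trigs_per_row))
--     idxs = prog + tail
--     fnames = [f"{subdir}/{fprefix}_{i:06d}.{fsuffix}" for i in idxs]
--     return idxs, fnames
-- ===== Notes on version B (the rewrite author's own statement) =====
-- stated objective: simpler
-- what changed: Replaces A's accumulator-driven while loop (running idx mutated per iteration) by a closed-form arithmetic progression: the step count k is computed once by ceiling division and the indices are emitted directly by formula; filenames by a comprehension instead of an append loop.
import Mathlib
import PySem

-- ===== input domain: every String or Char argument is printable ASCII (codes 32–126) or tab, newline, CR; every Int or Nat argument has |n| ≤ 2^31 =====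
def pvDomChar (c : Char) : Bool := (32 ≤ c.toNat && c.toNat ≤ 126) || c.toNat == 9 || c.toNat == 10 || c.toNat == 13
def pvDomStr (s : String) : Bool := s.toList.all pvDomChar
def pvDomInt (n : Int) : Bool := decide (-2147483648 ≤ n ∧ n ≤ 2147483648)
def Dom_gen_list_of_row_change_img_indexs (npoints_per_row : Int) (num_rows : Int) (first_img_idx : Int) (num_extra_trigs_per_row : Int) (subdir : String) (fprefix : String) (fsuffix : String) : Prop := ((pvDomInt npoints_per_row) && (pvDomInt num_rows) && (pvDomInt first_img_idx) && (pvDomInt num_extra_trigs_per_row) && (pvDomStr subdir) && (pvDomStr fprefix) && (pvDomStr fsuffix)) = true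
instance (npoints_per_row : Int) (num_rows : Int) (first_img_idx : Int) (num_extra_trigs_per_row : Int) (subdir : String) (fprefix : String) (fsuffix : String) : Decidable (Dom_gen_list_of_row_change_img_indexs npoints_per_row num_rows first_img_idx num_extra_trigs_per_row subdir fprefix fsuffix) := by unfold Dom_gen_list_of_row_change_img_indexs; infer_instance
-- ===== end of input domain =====

-- B replaces A's accumulator-driven while loop by a closed-form arithmetic progression
-- (ceiling-division step count), the objective is 'simpler'; return values only (no mutation).

-- shared helper: the f-string "{subdir}/{fprefix}_{r:06d}.{fsuffix}" (identical in both Pythons);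
-- zero-padding to width 6 including the sign, exactly Python's %06d on |r| ≤ 2^31
def pvZfill (s : String) (n : Nat) : String :=
  String.mk (List.replicate (n - s.toList.length) '0') ++ s

def pvPad6 (r : Int) : String :=
  if r < 0 then "-" ++ pvZfill (PySem.Int.toStr (-r)) 5 else pvZfill (PySem.Int.toStr r) 6

def pvFmtName (subdir fprefix fsuffix : String) (r : Int) : String :=
  subdir ++ "/" ++ fprefix ++ "_" ++ pvPad6 r ++ "." ++ fsuffix

-- ===== PORT A =====
-- A's while loop, step for step; the fuel only makes it total (it is never exhausted
-- on inputs satisfying Pre_, where the Python loop terminates)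
def pvLoopA (first np ex hi : Int) : Nat → Int → List Int → List Int × Int
  | 0, idx, acc => (acc, idx)
  | f + 1, idx, acc =>
    if idx < hi then
      if idx = first then pvLoopA first np ex hi f (idx + np) (acc ++ [idx + np])
      else pvLoopA first np ex hi f (idx + np + ex) (acc ++ [idx + np + ex])
    else (acc, idx)

def gen_list_of_row_change_img_indexs (npoints_per_row : Int) (num_rows : Int) (first_img_idx : Int) (num_extra_trigs_per_row : Int) (subdir : String) (fprefix : String) (fsuffix : String) : List Int × List String :=
  let hi := first_img_idx + npoints_per_row * num_rows
  let fuel := (npoints_per_row * num_rows).natAbs + npoints_per_row.natAbs + 2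
  let res := pvLoopA first_img_idx npoints_per_row num_extra_trigs_per_row hi fuel first_img_idx []
  let idx := res.2 + 1
  let lst := res.1 ++ PySem.List.pyRange idx (idx + npoints_per_row + num_extra_trigs_per_row + num_extra_trigs_per_row) 1
  (lst, List.foldl (fun acc r => acc ++ [pvFmtName subdir fprefix fsuffix r]) [] lst)

-- ===== PORT B =====
def gen_list_of_row_change_img_indexs_alt (npoints_per_row : Int) (num_rows : Int) (first_img_idx : Int) (num_extra_trigs_per_row : Int) (subdir : String) (fprefix : String) (fsuffix : String) : List Int × List String :=
  let total := npoints_per_row * num_rows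
  let step := npoints_per_row + num_extra_trigs_per_row
  let pr : List Int × Int :=
    if 0 < total then
      let start := first_img_idx + npoints_per_row
      let rem := total - npoints_per_row
      let k : Int := if rem ≤ 0 then 0 else -(PySem.Int.floordiv (-rem) step)
      ((PySem.List.pyRange 0 (k + 1) 1).map (fun j => start + j * step), start + k * step)
    else ([], first_img_idx)
  let tail_start := pr.2 + 1
  let idxs := pr.1 ++ PySem.List.pyRange tail_start (tail_start + npoints_per_row + 2 * num_extra_trigs_per_row) 1
  (idxs, idxs.map (pvFmtName subdir fprefix fsuffix))

-- ===== PRECONDITION & SPEC =====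
-- Pre_ excludes exactly the inputs on which A's while loop never terminates (A returns no value
-- there): it requires the loop body to run zero times, or once, or to advance by a positive step
-- that never lands back on first_img_idx (which would restart the cycle forever).
def Pre_gen_list_of_row_change_img_indexs (npoints_per_row : Int) (num_rows : Int) (first_img_idx : Int) (num_extra_trigs_per_row : Int) (subdir : String) (fprefix : String) (fsuffix : String) : Prop :=
  npoints_per_row * num_rows ≤ 0 ∨ npoints_per_row * num_rows ≤ npoints_per_row ∨
    (0 < npoints_per_row + num_extra_trigs_per_row ∧
      ¬(npoints_per_row < 0 ∧ (npoints_per_row + num_extra_trigs_per_row) ∣ (-npoints_per_row)))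
instance (npoints_per_row : Int) (num_rows : Int) (first_img_idx : Int) (num_extra_trigs_per_row : Int) (subdir : String) (fprefix : String) (fsuffix : String) : Decidable (Pre_gen_list_of_row_change_img_indexs npoints_per_row num_rows first_img_idx num_extra_trigs_per_row subdir fprefix fsuffix) := by unfold Pre_gen_list_of_row_change_img_indexs; infer_instance

def pvWitness_gen_list_of_row_change_img_indexs : Int × Int × Int × Int × String × String × String :=
  (10, 5, 0, 1, "/00_00", "FPREFIX", "h5")

def Spec_gen_list_of_row_change_img_indexs (npoints_per_row : Int) (num_rows : Int) (first_img_idx : Int) (num_extra_trigs_per_row : Int) (subdir : String) (fprefix : String) (fsuffix : String) (out : List Int × List String) : Prop := out = gen_list_of_row_change_img_indexs_alt npoints_per_row num_rows first_img_idx num_extra_trigs_per_row subdir fprefix fsuffix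
instance (npoints_per_row : Int) (num_rows : Int) (first_img_idx : Int) (num_extra_trigs_per_row : Int) (subdir : String) (fprefix : String) (fsuffix : String) (out : List Int × List String) : Decidable (Spec_gen_list_of_row_change_img_indexs npoints_per_row num_rows first_img_idx num_extra_trigs_per_row subdir fprefix fsuffix out) := by unfold Spec_gen_list_of_row_change_img_indexs; infer_instance

-- ===== CLAIM (what is proved, stated in full; the proofs are below) =====
def Claim_equal_gen_list_of_row_change_img_indexs : Prop := ∀ (npoints_per_row : Int) (num_rows : Int) (first_img_idx : Int) (num_extra_trigs_per_row : Int) (subdir : String) (fprefix : String) (fsuffix : String), Dom_gen_list_of_row_change_img_indexs npoints_per_row num_rows first_img_idx num_extra_trigs_per_row subdir fprefix fsuffix → Pre_gen_list_of_row_change_img_indexs npoints_per_row num_rows first_img_idx num_extra_trigs_per_row subdir fprefix fsuffix → Spec_gen_list_of_row_change_img_indexs npoints_per_row num_rows first_img_idx num_extra_trigs_per_row subdir fprefix fsuffix (gen_list_of_row_change_img_indexs npoints_per_row num_rows first_img_idx num_extra_trigs_per_row subdir fprefix fsuffix)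

-- ===== LEMMAS AND PROOFS =====

theorem pvWitness_ok : Dom_gen_list_of_row_change_img_indexs 10 5 0 1 "/00_00" "FPREFIX" "h5" ∧ Pre_gen_list_of_row_change_img_indexs 10 5 0 1 "/00_00" "FPREFIX" "h5" := by decide

-- A's filename loop is a map
theorem pvFoldl_map (f : Int → String) : ∀ (l : List Int) (acc : List String),
    List.foldl (fun a r => a ++ [f r]) acc l = acc ++ l.map f := by
  intro l
  induction l with
  | nil => intro acc; simp
  | cons x xs ih => intro acc; simp [List.foldl, ih]

-- the loop after its first iteration: a pure arithmetic progression
theorem pvLoop_prog (first np ex hi : Int) :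
    ∀ (kn f : Nat) (j : Int) (acc : List Int), kn ≤ f →
    (∀ t : Nat, t < kn → first + np + ((j : Int) + t) * (np + ex) ≠ first) →
    (∀ t : Nat, t < kn → first + np + ((j : Int) + t) * (np + ex) < hi) →
    hi ≤ first + np + ((j : Int) + kn) * (np + ex) →
    pvLoopA first np ex hi f (first + np + j * (np + ex)) acc =
      (acc ++ (List.range kn).map (fun t : Nat => first + np + (j + 1 + (t : Int)) * (np + ex)),
        first + np + (j + kn) * (np + ex)) := by
  intro kn
  induction kn with
  | zero =>
    intro f j acc _ _ _ hfin
    have hz : (j + ((0 : Nat) : Int)) * (np + ex) = j * (np + ex) := by push_cast; ring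
    rw [hz] at hfin
    have hge : ¬ first + np + j * (np + ex) < hi := by omega
    cases f with
    | zero => simp [pvLoopA]
    | succ f' => simp [pvLoopA, hge]
  | succ kn ih =>
    intro f j acc hf hne hlt hfin
    cases f with
    | zero => omega
    | succ f' =>
      have hlt0 : first + np + j * (np + ex) < hi := by
        have := hlt 0 (Nat.succ_pos kn); simpa using this
      have hne0 : first + np + j * (np + ex) ≠ first := by
        have := hne 0 (Nat.succ_pos kn); simpa using this
      have hstep : first + np + j * (np + ex) + np + ex = first + np + (j + 1) * (np + ex) := by ring
      have ih' := ih f' (j + 1) (acc ++ [first + np + (j + 1) * (np + ex)]) (by omega)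
        (by intro t ht
            have := hne (t + 1) (by omega)
            push_cast at this ⊢; convert this using 2; ring)
        (by intro t ht
            have := hlt (t + 1) (by omega)
            push_cast at this ⊢; convert this using 2; ring)
        (by push_cast at hfin ⊢; convert hfin using 2; ring)
      simp only [pvLoopA, if_pos hlt0, if_neg hne0, hstep, ih']
      simp only [Prod.mk.injEq]
      refine ⟨?_, by push_cast; ring⟩
      rw [List.range_succ_eq_map, List.map_cons, List.map_map]
      simp only [List.append_assoc, List.singleton_append]
      congr 2
      · push_cast; ring
      · apply List.map_congr_left
        intro t _
        simp only [Function.comp]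
        push_cast; ring

theorem pvLoopA_exit (first np ex hi : Int) : ∀ (f : Nat) (idx : Int) (acc : List Int),
    ¬ idx < hi → pvLoopA first np ex hi f idx acc = (acc, idx) := by
  intro f idx acc h
  cases f with
  | zero => simp [pvLoopA]
  | succ f' => simp [pvLoopA, h]

theorem gen_equal : ∀ (npoints_per_row : Int) (num_rows : Int) (first_img_idx : Int) (num_extra_trigs_per_row : Int) (subdir : String) (fprefix : String) (fsuffix : String), Pre_gen_list_of_row_change_img_indexs npoints_per_row num_rows first_img_idx num_extra_trigs_per_row subdir fprefix fsuffix → gen_list_of_row_change_img_indexs npoints_per_row num_rows first_img_idx num_extra_trigs_per_row subdir fprefix fsuffix = gen_list_of_row_change_img_indexs_alt npoints_per_row num_rows first_img_idx num_extra_trigs_per_row subdir fprefix fsuffix := by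
  intro np nr fi ex sub pre suf hPre
  unfold gen_list_of_row_change_img_indexs gen_list_of_row_change_img_indexs_alt
  simp only [pvFoldl_map, List.nil_append]
  by_cases hN : 0 < np * nr
  · obtain ⟨f', hf⟩ : ∃ m, (np * nr).natAbs + np.natAbs + 2 = m + 1 := ⟨(np * nr).natAbs + np.natAbs + 1, by omega⟩
    have hf1 : (np * nr).natAbs + np.natAbs + 1 ≤ f' := by omega
    rw [hf]
    have hin : fi < fi + np * nr := by omega
    simp only [pvLoopA, if_pos hin, List.nil_append, if_pos hN]
    by_cases hrem : np * nr - np ≤ 0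
    · -- single iteration
      have hexit : ¬ fi + np < fi + np * nr := by omega
      rw [pvLoopA_exit _ _ _ _ _ _ _ hexit]
      have hk : (if np * nr - np ≤ 0 then (0 : Int) else -(PySem.Int.floordiv (-(np * nr - np)) (np + ex))) = 0 := if_pos hrem
      rw [hk]
      simp only [if_true]
      rw [PySem.List.pyRange_one_singleton]
      simp only [List.map_cons, List.map_nil]
      have e1 : fi + np + 0 * (np + ex) = fi + np := by ring
      rw [e1]
      have e2 : fi + np + 1 + np + ex + ex = fi + np + 1 + np + 2 * ex := by ring
      rw [e2]
    · -- arithmetic progression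
      push_neg at hrem
      have hs : 0 < np + ex ∧ ¬(np < 0 ∧ (np + ex) ∣ (-np)) := by
        rcases hPre with h | h | h
        · omega
        · omega
        · exact h
      obtain ⟨hs, hnd⟩ := hs
      set k : Int := -(PySem.Int.floordiv (-(np * nr - np)) (np + ex)) with hkdef
      have hkb : (k - 1) * (np + ex) < np * nr - np ∧ np * nr - np ≤ k * (np + ex) :=
        (PySem.Int.neg_floordiv_neg_eq_iff_of_pos hs).mp hkdef.symm
      obtain ⟨hk2, hk1⟩ := hkb
      have hk0 : 1 ≤ k := by
        by_contra hc
        push_neg at hc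
        have : k * (np + ex) ≤ 0 := mul_nonpos_of_nonpos_of_nonneg (by omega) (by omega)
        omega
      have hkrem : k ≤ np * nr - np := by
        have h1 : (k - 1) * 1 ≤ (k - 1) * (np + ex) :=
          mul_le_mul_of_nonneg_left (by omega) (by omega)
        omega
      have hkn : ((k.toNat : Int)) = k := Int.toNat_of_nonneg (by omega)
      have hne : ∀ t : Nat, t < k.toNat → fi + np + ((0 : Int) + t) * (np + ex) ≠ fi := by
        intro t ht heq
        have heq' : np + (t : Int) * (np + ex) = 0 := by linear_combination heq
        rcases lt_trichotomy np 0 with hnp | hnp | hnp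
        · exact hnd ⟨hnp, ⟨t, by linear_combination -heq'⟩⟩
        · rw [hnp] at hN; simp at hN
        · have : (0 : Int) ≤ (t : Int) * (np + ex) :=
            mul_nonneg (Int.natCast_nonneg t) (by omega)
          omega
      have hlt : ∀ t : Nat, t < k.toNat → fi + np + ((0 : Int) + t) * (np + ex) < fi + np * nr := by
        intro t ht
        have h1 : (t : Int) ≤ k - 1 := by omega
        have h2 : (t : Int) * (np + ex) ≤ (k - 1) * (np + ex) :=
          mul_le_mul_of_nonneg_right h1 (by omega)
        have : ((0 : Int) + t) * (np + ex) = (t : Int) * (np + ex) := by ring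
        omega
      have hfin : fi + np * nr ≤ fi + np + ((0 : Int) + k.toNat) * (np + ex) := by
        have : ((0 : Int) + k.toNat) * (np + ex) = k * (np + ex) := by rw [hkn]; ring
        omega
      have hidx : fi + np = fi + np + 0 * (np + ex) := by ring
      rw [hidx, pvLoop_prog fi np ex (fi + np * nr) k.toNat f' 0 [fi + np + 0 * (np + ex)]
        (by omega) hne hlt hfin]
      have hkif : (if np * nr - np ≤ 0 then (0 : Int) else k) = k := if_neg (by omega)
      rw [hkif]
      simp only [if_true]
      have hidx2 : fi + np + (0 + (k.toNat : Int)) * (np + ex) = fi + np + 0 * (np + ex) + k * (np + ex) := by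
        rw [hkn]; ring
      have hlist : [fi + np + 0 * (np + ex)] ++
          (List.range k.toNat).map (fun t : Nat => fi + np + (0 + 1 + (t : Int)) * (np + ex)) =
          (PySem.List.pyRange 0 (k + 1) 1).map (fun j => fi + np + 0 * (np + ex) + j * (np + ex)) := by
        rw [PySem.List.pyRange_one]
        have hcount : ((k + 1 - 0).toNat) = k.toNat + 1 := by omega
        rw [hcount, List.range_succ_eq_map, List.map_cons, List.map_cons, List.map_map, List.map_map]
        simp only [List.singleton_append]
        congr 1
        · push_cast; ring
        · apply List.map_congr_left
          intro t _
          simp only [Function.comp]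
          push_cast; ring
      rw [hlist, hidx2]
      have hb : fi + np + 0 * (np + ex) + k * (np + ex) + 1 + np + ex + ex =
          fi + np + 0 * (np + ex) + k * (np + ex) + 1 + np + 2 * ex := by ring
      rw [hb]
  · -- loop body never runs
    have hexit : ¬ fi < fi + np * nr := by omega
    rw [pvLoopA_exit _ _ _ _ _ _ _ hexit, if_neg hN]
    have hb : fi + 1 + np + ex + ex = fi + 1 + np + 2 * ex := by ring
    simp only [List.nil_append, hb]

-- ===== VERDICT (by name: the statement is the Claim_ definition above) =====
theorem gen_list_of_row_change_img_indexs_spec : Claim_equal_gen_list_of_row_change_img_indexs := by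
  intro np nr fi ex sub pre suf _ hPre
  exact gen_equal np nr fi ex sub pre suf hPre
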